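-- pv_equiv track=rewrite | github.com/man0045/Data_Structure_with_Cpp | Bitsmanipulation/frequency.py | longest_good_subarray
-- ===== SOURCE A (Python) =====
-- def longest_good_subarray(nums, k):
--     frequency = {}
--     left = 0
--     max_length = 0
--
--     for right in range(len(nums)):
--         # Update the frequency of the current element
--         frequency[nums[right]] = frequency.get(nums[right], 0) + 1
--
--         # Shrink the window from the left until the array becomes good
--         while max(frequency.values()) > k:
--             frequency[nums[left]] -= 1
--             if frequency[nums[left]] == 0:
--                 del frequency[nums[left]]
--             left += 1
--
--         # Update the maximum length of good subarray
--         max_length = max(max_length, right - left + 1)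
--
--     return max_length
-- ===== SOURCE B (Python) =====
-- def longest_good_subarray(nums, k):
--     pos = {}          # value -> list of all its occurrence indices so far
--     start = 0         # leftmost start of a good window ending at the current index
--     best = 0
--     for i, x in enumerate(nums):
--         lst = pos.setdefault(x, [])
--         lst.append(i)
--         if len(lst) > k:
--             # a good window ending at i must start after the (k+1)-th last occurrence of x
--             s = lst[-(k + 1)] + 1
--             if s > start:
--                 start = s
--         cur = i - start + 1
--         if cur > best:
--             best = cur
--     return best
-- ===== Notes on version B (the rewrite author's own statement) =====
-- stated objective: faster
-- what changed: B abandons the shrinking two-pointer window with a frequency dict entirely: it keeps a list of occurrence indices per value and maintains the minimal good start directly as a running maximum of ((k+1)-th last occurrence of the current element)+1, so there is no inner shrink loop and no max() scan over counts.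
import Mathlib
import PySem

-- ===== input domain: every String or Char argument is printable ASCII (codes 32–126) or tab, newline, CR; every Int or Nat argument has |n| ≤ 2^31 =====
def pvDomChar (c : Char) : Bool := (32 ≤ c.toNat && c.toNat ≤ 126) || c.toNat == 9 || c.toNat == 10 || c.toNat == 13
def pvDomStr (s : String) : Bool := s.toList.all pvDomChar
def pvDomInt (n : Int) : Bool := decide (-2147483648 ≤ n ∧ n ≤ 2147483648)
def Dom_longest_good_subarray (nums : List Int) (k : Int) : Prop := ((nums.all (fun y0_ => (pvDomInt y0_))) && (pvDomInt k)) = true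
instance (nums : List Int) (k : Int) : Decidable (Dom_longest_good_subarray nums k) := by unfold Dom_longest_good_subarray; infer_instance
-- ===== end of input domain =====

-- B drops A's shrinking two-pointer window with a frequency dict: it records each value's
-- occurrence indices and maintains the minimal good start as a running maximum of
-- ((k+1)-th last occurrence of the current element) + 1 — no inner shrink loop, no max() scan.

-- ===== PORT A =====
-- A's while loop is ported as fuel recursion (fuel = nums.length + 1, more than it can iterate,
-- since left grows each pass and nums[left] must stay in range). Branches returning the state
-- unchanged mark the spots where the Python raises; Pre_ excludes the inputs that reach them.
def shrinkA (nums : List Int) (k : Int) : Nat → PySem.Dict Int Int → Int → PySem.Dict Int Int × Int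
  | 0, freq, left => (freq, left)
  | fuel + 1, freq, left =>
    match PySem.List.max? freq.values (fun v => v) with
    | none => (freq, left)        -- max(()) : ValueError (outside Pre_)
    | some m =>
      if k < m then
        match PySem.List.pyGet? nums left with
        | none => (freq, left)    -- IndexError (outside Pre_)
        | some y =>
          match freq.get? y with
          | none => (freq, left)  -- KeyError (outside Pre_)
          | some c =>
            shrinkA nums k fuel
              (if c - 1 = 0 then (freq.insert y (c - 1)).erase y else freq.insert y (c - 1))
              (left + 1)
      else (freq, left)

def stepA (nums : List Int) (k : Int) (st : PySem.Dict Int Int × Int × Int) (right : Int) :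
    PySem.Dict Int Int × Int × Int :=
  match PySem.List.pyGet? nums right with
  | none => st                    -- unreachable: right ∈ range(len(nums))
  | some x =>
    let freq := st.1.insert x (st.1.getD x 0 + 1)
    let r := shrinkA nums k (nums.length + 1) freq st.2.1
    (r.1, r.2, max st.2.2 (right - r.2 + 1))

def longest_good_subarray (nums : List Int) (k : Int) : Int :=
  ((PySem.List.pyRange 0 (nums.length : Int) 1).foldl (stepA nums k)
    (PySem.Dict.empty, 0, 0)).2.2

-- ===== PORT B =====
-- pos maps a value to the list of all its occurrence indices so far; lst.append(i) on the list
-- obtained from setdefault is modelled by re-inserting the extended list under the same key.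
def stepB (k : Int) (st : PySem.Dict Int (List Int) × Int × Int) (p : Int × Int) :
    PySem.Dict Int (List Int) × Int × Int :=
  let lst := st.1.getD p.2 [] ++ [p.1]
  let pos := st.1.insert p.2 lst
  let start :=
    if k < (lst.length : Int) then
      match PySem.List.pyGet? lst (-(k + 1)) with
      | none => st.2.1            -- IndexError (outside Pre_)
      | some j => if st.2.1 < j + 1 then j + 1 else st.2.1
    else st.2.1
  (pos, start, if st.2.2 < p.1 - start + 1 then p.1 - start + 1 else st.2.2)

def longest_good_subarray_alt (nums : List Int) (k : Int) : Int :=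
  ((PySem.List.enumerate nums 0).foldl (stepB k) (PySem.Dict.empty, 0, 0)).2.2

-- ===== PRECONDITION & SPEC =====
-- A raises (ValueError from max(()) after the window empties) exactly when nums ≠ [] and k ≤ 0.
def Pre_longest_good_subarray (nums : List Int) (k : Int) : Prop := nums = [] ∨ 1 ≤ k
instance (nums : List Int) (k : Int) : Decidable (Pre_longest_good_subarray nums k) := by
  unfold Pre_longest_good_subarray; infer_instance

def pvWitness_longest_good_subarray : List Int × Int := ([1, 2, 1, 2, 1], 2)

def Spec_longest_good_subarray (nums : List Int) (k : Int) (out : Int) : Prop := out = longest_good_subarray_alt nums k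
instance (nums : List Int) (k : Int) (out : Int) : Decidable (Spec_longest_good_subarray nums k out) := by unfold Spec_longest_good_subarray; infer_instance

-- ===== CLAIM (what is proved, stated in full; the proofs are below) =====
def Claim_equal_longest_good_subarray : Prop := ∀ (nums : List Int) (k : Int), Dom_longest_good_subarray nums k → Pre_longest_good_subarray nums k → Spec_longest_good_subarray nums k (longest_good_subarray nums k)

-- ===== LEMMAS AND PROOFS =====

-- Proof-side reference: A's sliding window with the max() scan replaced by the one count
-- that can exceed k.  A is proved equal to this reference (lock-step), and the reference
-- is then proved equal to B's occurrence-index computation.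
def shrinkR (nums : List Int) (k x : Int) : Nat → PySem.Dict Int Int → Int → PySem.Dict Int Int × Int
  | 0, freq, left => (freq, left)
  | fuel + 1, freq, left =>
    match freq.get? x with
    | none => (freq, left)
    | some cx =>
      if k < cx then
        match PySem.List.pyGet? nums left with
        | none => (freq, left)
        | some y =>
          match freq.get? y with
          | none => (freq, left)
          | some c =>
            shrinkR nums k x fuel
              (if c - 1 = 0 then (freq.insert y (c - 1)).erase y else freq.insert y (c - 1))
              (left + 1)
      else (freq, left)

def stepR (nums : List Int) (k : Int) (st : PySem.Dict Int Int × Int × Int) (p : Int × Int) :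
    PySem.Dict Int Int × Int × Int :=
  let freq := st.1.insert p.2 (st.1.getD p.2 0 + 1)
  let r := shrinkR nums k p.2 (nums.length + 1) freq st.2.1
  (r.1, r.2, max st.2.2 (p.1 - r.2 + 1))

-- `Cnt freq W`: freq is exactly the multiset of counts of the current window W.
def Cnt (freq : PySem.Dict Int Int) (W : List Int) : Prop :=
  (∀ y : Int, freq.getD y 0 = (W.count y : Int)) ∧
  (∀ p ∈ freq.items, p.2 = (W.count p.1 : Int) ∧ p.2 ≠ 0)

-- occurrence indices of x in the first i elements of nums
def occ (nums : List Int) (x : Int) (i : Nat) : List Nat :=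
  (List.range i).filter (fun j => nums[j]? == some x)

lemma find?_filter_key_ne (l : List (Int × Int)) (y z : Int) (h : z ≠ y) :
    (l.filter (fun p => !(p.1 == y))).find? (fun p => p.1 == z) = l.find? (fun p => p.1 == z) := by
  induction l with
  | nil => rfl
  | cons a t ih =>
    by_cases hay : a.1 = y
    · rw [List.filter_cons_of_neg (by simp [hay]), ih,
        List.find?_cons_of_neg (by simp [hay, Ne.symm h])]
    · rw [List.filter_cons_of_pos (by simp [hay])]
      by_cases haz : a.1 = z
      · rw [List.find?_cons_of_pos (by simp [haz]), List.find?_cons_of_pos (by simp [haz])]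
      · rw [List.find?_cons_of_neg (by simp [haz]), List.find?_cons_of_neg (by simp [haz]), ih]

lemma get?_erase_of_ne (d : PySem.Dict Int Int) (y z : Int) (h : z ≠ y) :
    (d.erase y).get? z = d.get? z := by
  simp only [PySem.Dict.erase, PySem.Dict.get?]
  rw [find?_filter_key_ne d.items y z h]

lemma get?_erase_self (d : PySem.Dict Int Int) (y : Int) : (d.erase y).get? y = none := by
  simp only [PySem.Dict.erase, PySem.Dict.get?]
  rw [List.find?_eq_none.mpr]
  · rfl
  · intro p hp
    simp only [List.mem_filter] at hp
    simpa using hp.2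

lemma mem_items_erase {d : PySem.Dict Int Int} {y : Int} {p : Int × Int} :
    p ∈ (d.erase y).items ↔ p ∈ d.items ∧ p.1 ≠ y := by
  simp [PySem.Dict.erase]

lemma cnt_get? {freq : PySem.Dict Int Int} {W : List Int} {y : Int}
    (h : Cnt freq W) (hy : 0 < W.count y) : freq.get? y = some ((W.count y : Int)) := by
  have h1 := h.1 y
  rw [PySem.Dict.getD_eq_get?_getD] at h1
  cases hg : freq.get? y with
  | none => rw [hg] at h1; simp at h1; omega
  | some v => rw [hg] at h1; simp at h1; rw [h1]

lemma cnt_get?_none {freq : PySem.Dict Int Int} {W : List Int} {y : Int}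
    (h : Cnt freq W) (hy : W.count y = 0) : freq.get? y = none := by
  cases hg : freq.get? y with
  | none => rfl
  | some v =>
    have hmem := PySem.Dict.mem_items_of_get?_eq_some freq hg
    have h2 := (h.2 _ hmem).1
    have h3 := (h.2 _ hmem).2
    simp only [hy] at h2
    simp [h2] at h3

-- Under Cnt, with every other count ≤ k, A's `max(freq.values()) > k` is `count x > k`.
lemma cnt_max_iff {freq : PySem.Dict Int Int} {W : List Int} {k x : Int}
    (h : Cnt freq W) (hx : 0 < W.count x)
    (hothers : ∀ y : Int, y ≠ x → (W.count y : Int) ≤ k) :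
    ∃ m, PySem.List.max? freq.values (fun v => v) = some m ∧ (k < m ↔ k < (W.count x : Int)) := by
  have hgx := cnt_get? h hx
  have hmem : ((x, (W.count x : Int))) ∈ freq.items := PySem.Dict.mem_items_of_get?_eq_some freq hgx
  have hv : ((W.count x : Int)) ∈ freq.values := List.mem_map.mpr ⟨_, hmem, rfl⟩
  cases hmax : PySem.List.max? freq.values (fun v => v) with
  | none =>
    have := (PySem.List.max?_eq_none_iff _ _).mp hmax
    rw [this] at hv; simp at hv
  | some m =>
    refine ⟨m, rfl, ?_, ?_⟩
    · intro hkm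
      have hm := PySem.List.max?_mem hmax
      obtain ⟨p, hp, hpm⟩ := List.mem_map.mp hm
      obtain ⟨hpc, _⟩ := h.2 p hp
      by_cases hpx : p.1 = x
      · rw [← hpm, hpc, hpx] at hkm; exact hkm
      · have := hothers p.1 hpx; rw [← hpm, hpc] at hkm; omega
    · intro hkx
      have hle := PySem.List.max?_isMax hmax _ hv
      simp only at hle
      omega

-- One pass of the shared loop body preserves Cnt, for the window minus its head.
lemma cnt_step {freq : PySem.Dict Int Int} {W' : List Int} {y c : Int}
    (h : Cnt freq (y :: W')) (hc : freq.get? y = some c) :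
    Cnt (if c - 1 = 0 then (freq.insert y (c - 1)).erase y else freq.insert y (c - 1)) W' := by
  have hcval : c = ((y :: W').count y : Int) := by
    have h1 := h.1 y
    rw [PySem.Dict.getD_eq_get?_getD, hc] at h1
    simpa using h1
  have hcnt : c = (W'.count y : Int) + 1 := by
    rw [hcval]; simp
  by_cases h0 : c - 1 = 0
  · simp only [h0, if_true]
    constructor
    · intro z
      by_cases hzy : z = y
      · subst hzy
        rw [PySem.Dict.getD_eq_get?_getD, get?_erase_self]
        simp; omega
      · rw [PySem.Dict.getD_eq_get?_getD, get?_erase_of_ne _ _ _ hzy,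
            ← PySem.Dict.getD_eq_get?_getD, PySem.Dict.getD_insert_of_ne _ _ _ hzy, h.1 z]
        simp [Ne.symm hzy]
    · intro p hp
      obtain ⟨hpi, hpy⟩ := mem_items_erase.mp hp
      rcases (PySem.Dict.mem_items_insert _ _ _ _).mp hpi with heq | ⟨hpold, hpne⟩
      · exact absurd (congrArg Prod.fst heq) hpy
      · obtain ⟨h1, h2⟩ := h.2 p hpold
        refine ⟨?_, h2⟩
        rw [h1]; simp [Ne.symm hpy]
  · simp only [h0, if_false]
    constructor
    · intro z
      by_cases hzy : z = y
      · subst hzy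
        rw [PySem.Dict.getD_insert_self]
        omega
      · rw [PySem.Dict.getD_insert_of_ne _ _ _ hzy, h.1 z]
        simp [Ne.symm hzy]
    · intro p hp
      rcases (PySem.Dict.mem_items_insert _ _ _ _).mp hp with heq | ⟨hpold, hpne⟩
      · subst heq
        constructor
        · simp; omega
        · exact h0
      · obtain ⟨h1, h2⟩ := h.2 p hpold
        refine ⟨?_, h2⟩
        rw [h1]; simp [Ne.symm hpne]

-- adding the new element on the right preserves Cnt
lemma cnt_insert {freq : PySem.Dict Int Int} {W : List Int} (t : Int) (h : Cnt freq W) :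
    Cnt (freq.insert t (freq.getD t 0 + 1)) (W ++ [t]) := by
  constructor
  · intro z
    rw [PySem.Dict.getD_insert]
    split_ifs with hzt
    · subst hzt; rw [h.1 z]; simp [List.count_append]
    · rw [h.1 z]; simp [List.count_append, List.count_eq_zero, hzt]
  · intro p hp
    rcases (PySem.Dict.mem_items_insert _ _ _ _).mp hp with heq | ⟨hpold, hpne⟩
    · subst heq
      constructor
      · rw [h.1 t]; simp [List.count_append]
      · rw [h.1 t]
        have : (0:Int) ≤ (W.count t : Int) := by positivity
        omega
    · obtain ⟨h1, h2⟩ := h.2 p hpold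
      refine ⟨?_, h2⟩
      rw [h1]; simp [List.count_append, List.count_eq_zero, hpne]

-- A's shrink loop and the reference shrink loop run in lock-step and exit with every count ≤ k.
lemma shrink_eq (nums : List Int) (k x : Int) (i : Nat) (hk : 1 ≤ k) :
    ∀ (fuel l : Nat) (freq : PySem.Dict Int Int),
      ((nums.take i).drop l).length < fuel →
      Cnt freq ((nums.take i).drop l) →
      (∀ y : Int, y ≠ x → (((nums.take i).drop l).count y : Int) ≤ k) →
      0 < ((nums.take i).drop l).count x →
      ∃ (freq' : PySem.Dict Int Int) (l' : Nat),
        shrinkA nums k fuel freq (l : Int) = (freq', (l' : Int)) ∧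
        shrinkR nums k x fuel freq (l : Int) = (freq', (l' : Int)) ∧
        Cnt freq' ((nums.take i).drop l') ∧
        (∀ y : Int, (((nums.take i).drop l').count y : Int) ≤ k) ∧
        0 < ((nums.take i).drop l').count x := by
  intro fuel
  induction fuel with
  | zero => intro l freq hlen _ _ _; omega
  | succ fuel ih =>
    intro l freq hlen hcnt hothers hx
    set W := (nums.take i).drop l with hW
    obtain ⟨m, hmax, hmiff⟩ := cnt_max_iff hcnt hx hothers
    have hgx := cnt_get? hcnt hx
    by_cases hcond : k < (W.count x : Int)
    · -- both loops iterate
      have hWne : W ≠ [] := by intro hnil; rw [hnil] at hx; simp at hx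
      have hllt : l < (nums.take i).length := by
        by_contra hge
        exact hWne (List.drop_eq_nil_of_le (by omega))
      have hlin : l < nums.length := lt_of_lt_of_le hllt (by simp)
      have hWhead : W = nums[l] :: (nums.take i).drop (l + 1) := by
        rw [hW, List.drop_eq_getElem_cons hllt, List.getElem_take]
      have hpy : PySem.List.pyGet? nums (l : Int) = some nums[l] := by
        rw [PySem.List.pyGet?_natCast]
        exact List.getElem?_eq_getElem hlin
      have hcy : 0 < W.count nums[l] := by rw [hWhead]; simp
      have hgy := cnt_get? hcnt hcy
      have hcnt' : Cnt (if (W.count nums[l] : Int) - 1 = 0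
            then (freq.insert nums[l] ((W.count nums[l] : Int) - 1)).erase nums[l]
            else freq.insert nums[l] ((W.count nums[l] : Int) - 1)) ((nums.take i).drop (l + 1)) := by
        have := cnt_step (W' := (nums.take i).drop (l + 1)) (y := nums[l]) (c := (W.count nums[l] : Int))
          (by rw [← hWhead]; exact hcnt) (by rw [hgy])
        exact this
      have hWlen : W.length = ((nums.take i).drop (l + 1)).length + 1 := by
        rw [hWhead]; simp
      have hcount' : ∀ z : Int, ((nums.take i).drop (l + 1)).count z ≤ W.count z := by
        intro z; rw [hWhead]; simp [List.count_cons]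
      have hothers' : ∀ y : Int, y ≠ x → ((((nums.take i).drop (l + 1)).count y : Int)) ≤ k := by
        intro y hy
        have := hothers y hy
        have := hcount' y
        omega
      have hx' : 0 < ((nums.take i).drop (l + 1)).count x := by
        by_cases hxy : x = nums[l]
        · have hcc : W.count x = ((nums.take i).drop (l + 1)).count x + 1 := by
            rw [hWhead, ← hxy, List.count_cons_self]
          omega
        · have hcc : W.count x = ((nums.take i).drop (l + 1)).count x := by
            rw [hWhead, List.count_cons_of_ne (Ne.symm hxy)]
          omega
      obtain ⟨freq', l', hA, hB, hC, hK, hP⟩ :=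
        ih (l + 1) _ (by omega) hcnt' hothers' hx'
      refine ⟨freq', l', ?_, ?_, hC, hK, hP⟩
      · show shrinkA nums k (fuel + 1) freq (l : Int) = _
        simp only [shrinkA, hmax, hpy, hgy]
        rw [if_pos (hmiff.mpr hcond)]
        have hcast : ((l : Int) + 1) = ((l + 1 : Nat) : Int) := by push_cast; ring
        rw [hcast]
        exact hA
      · show shrinkR nums k x (fuel + 1) freq (l : Int) = _
        simp only [shrinkR, hgx, hpy, hgy]
        rw [if_pos hcond]
        have hcast : ((l : Int) + 1) = ((l + 1 : Nat) : Int) := by push_cast; ring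
        rw [hcast]
        exact hB
    · -- both loops stop here
      refine ⟨freq, l, ?_, ?_, hcnt, ?_, hx⟩
      · show shrinkA nums k (fuel + 1) freq (l : Int) = _
        simp only [shrinkA, hmax]
        rw [if_neg (fun hkm => hcond (hmiff.mp hkm))]
      · show shrinkR nums k x (fuel + 1) freq (l : Int) = _
        simp only [shrinkR, hgx]
        rw [if_neg hcond]
      · intro y
        by_cases hyx : y = x
        · subst hyx; rw [← hW]; omega
        · rw [← hW]; exact hothers y hyx

-- A's outer fold agrees with the reference fold from any state satisfying the window invariant.
lemma outer_eq (nums : List Int) (k : Int) (hk : 1 ≤ k) :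
    ∀ (ts : List Int) (i l : Nat) (freq : PySem.Dict Int Int) (ml : Int),
      nums = nums.take i ++ ts →
      l ≤ i →
      Cnt freq ((nums.take i).drop l) →
      (∀ y : Int, (((nums.take i).drop l).count y : Int) ≤ k) →
      (PySem.List.pyRange (i : Int) (nums.length : Int) 1).foldl (stepA nums k) (freq, (l : Int), ml)
        = (PySem.List.enumerate ts (i : Int)).foldl (stepR nums k) (freq, (l : Int), ml) := by
  intro ts
  induction ts with
  | nil =>
    intro i l freq ml hsplit _ _ _
    have hlen : nums.length ≤ i := by
      have := congrArg List.length hsplit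
      simp at this
      omega
    rw [PySem.List.pyRange_one_eq_nil (by exact_mod_cast hlen), PySem.List.enumerate_nil]
    rfl
  | cons t ts' ih =>
    intro i l freq ml hsplit hli hcnt hklt
    have hile : i ≤ nums.length := by
      by_contra hgt
      have htake : nums.take i = nums := List.take_of_length_le (by omega)
      have := congrArg List.length hsplit
      rw [htake] at this; simp at this
    have htl : (nums.take i).length = i := by simp [hile]
    have hilen : i < nums.length := by
      have h2 := congrArg List.length hsplit
      simp only [List.length_append, htl, List.length_cons] at h2
      omega
    have hnum_i : nums[i]? = some t := by
      conv_lhs => rw [hsplit]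
      rw [List.getElem?_append_right (by omega)]
      simp [htl]
    have htake1 : nums.take (i + 1) = nums.take i ++ [t] := by
      rw [List.take_add_one, hnum_i]; rfl
    rw [PySem.List.pyRange_one_cons (by exact_mod_cast hilen), PySem.List.enumerate_cons]
    simp only [List.foldl_cons]
    have hpy : PySem.List.pyGet? nums (i : Int) = some t := by
      rw [PySem.List.pyGet?_natCast, hnum_i]
    have hWin : (nums.take (i + 1)).drop l = (nums.take i).drop l ++ [t] := by
      rw [htake1, List.drop_append_of_le_length (by omega)]
    set W := (nums.take i).drop l with hWdef
    have hcnt1 : Cnt (freq.insert t (freq.getD t 0 + 1)) ((nums.take (i + 1)).drop l) := by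
      rw [hWin]; exact cnt_insert t hcnt
    have hothers1 : ∀ y : Int, y ≠ t → ((((nums.take (i + 1)).drop l).count y : Int)) ≤ k := by
      intro y hy
      rw [hWin]
      have h4 := hklt y
      have h5 : List.count y [t] = 0 := by simp [List.count_eq_zero, hy]
      rw [List.count_append, h5]
      push_cast
      omega
    have hx1 : 0 < ((nums.take (i + 1)).drop l).count t := by
      rw [hWin]; simp
    have hlen1 : ((nums.take (i + 1)).drop l).length < nums.length + 1 := by
      have : ((nums.take (i + 1)).drop l).length ≤ (nums.take (i + 1)).length := by
        rw [List.length_drop]; omega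
      have h2 : (nums.take (i + 1)).length ≤ nums.length := by simp
      omega
    obtain ⟨freq', l', hA, hB, hC, hK, hP⟩ :=
      shrink_eq nums k t (i + 1) hk (nums.length + 1) l
        (freq.insert t (freq.getD t 0 + 1)) hlen1 hcnt1 hothers1 hx1
    have hstepA : stepA nums k (freq, (l : Int), ml) (i : Int)
        = (freq', (l' : Int), max ml ((i : Int) - (l' : Int) + 1)) := by
      unfold stepA
      rw [hpy]
      simp only
      rw [hA]
    have hstepR : stepR nums k (freq, (l : Int), ml) ((i : Int), t)
        = (freq', (l' : Int), max ml ((i : Int) - (l' : Int) + 1)) := by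
      unfold stepR
      simp only
      rw [hB]
    rw [hstepA, hstepR]
    have hl'le : l' ≤ i + 1 := by
      by_contra hgt
      have : (nums.take (i + 1)).drop l' = [] :=
        List.drop_eq_nil_of_le (by simp; omega)
      rw [this] at hP; simp at hP
    have hsplit' : nums = nums.take (i + 1) ++ ts' := by
      rw [htake1]
      conv_lhs => rw [hsplit]
      simp
    have hcast : ((i : Int) + 1) = ((i + 1 : Nat) : Int) := by push_cast; ring
    rw [hcast]
    exact ih (i + 1) l' freq' (max ml ((i : Int) - (l' : Int) + 1)) hsplit' hl'le hC hK

-- ===== occurrence-list facts =====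

lemma mem_occ {nums : List Int} {x : Int} {i j : Nat} :
    j ∈ occ nums x i ↔ j < i ∧ nums[j]? = some x := by
  simp [occ, List.mem_filter, List.mem_range]

lemma occ_sorted (nums : List Int) (x : Int) (i : Nat) :
    (occ nums x i).Pairwise (· < ·) := by
  exact List.Pairwise.sublist List.filter_sublist List.pairwise_lt_range

lemma occ_succ (nums : List Int) (x : Int) (i : Nat) :
    occ nums x (i + 1) = occ nums x i ++ (if nums[i]? = some x then [i] else []) := by
  simp only [occ, List.range_succ, List.filter_append]
  congr 1
  by_cases h : nums[i]? = some x
  · simp [h]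
  · simp [h]

-- the window count of x is the number of occurrences at index ≥ l
lemma count_window (nums : List Int) (x : Int) :
    ∀ (i l : Nat), ((nums.take i).drop l).count x
      = ((occ nums x i).filter (fun j => decide (l ≤ j))).length := by
  intro i
  induction i with
  | zero => intro l; simp [occ]
  | succ i ih =>
    intro l
    rw [occ_succ, List.filter_append, List.length_append, ← ih l]
    by_cases hi : i < nums.length
    · have htake1 : nums.take (i + 1) = nums.take i ++ [nums[i]] := by
        rw [List.take_add_one, List.getElem?_eq_getElem hi]; rfl
      by_cases hl : l ≤ i
      · have hdrop : (nums.take (i + 1)).drop l = (nums.take i).drop l ++ [nums[i]] := by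
          rw [htake1, List.drop_append_of_le_length (by simp; omega)]
        rw [hdrop, List.count_append]
        by_cases hx : nums[i]? = some x
        · have hxi : nums[i] = x := by
            have := List.getElem?_eq_getElem hi ▸ hx
            exact Option.some.inj this
          simp [hx, hxi, hl]
        · have hxi : ¬ nums[i] = x := by
            intro hc
            exact hx (by rw [List.getElem?_eq_getElem hi, hc])
          simp [hx, hxi]
      · have hd1 : (nums.take (i + 1)).drop l = [] := by
          apply List.drop_eq_nil_of_le; simp; omega
        have hd0 : (nums.take i).drop l = [] := by
          apply List.drop_eq_nil_of_le; simp; omega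
        rw [hd1, hd0]
        split_ifs with hx
        · have hli : ¬ l ≤ i := by omega
          simp [hli]
        · simp
    · have hx : nums[i]? = none := List.getElem?_eq_none (by omega)
      have htake1 : nums.take (i + 1) = nums.take i := by
        rw [List.take_of_length_le (by omega), List.take_of_length_le (by omega)]
      rw [htake1, if_neg (by simp [hx])]
      simp

-- a pairwise-< list splits into its elements below l followed by those ≥ l
lemma split_sorted (l : Nat) :
    ∀ (L : List Nat), L.Pairwise (· < ·) →
      L = L.filter (fun j => decide (j < l)) ++ L.filter (fun j => decide (l ≤ j)) := by
  intro L
  induction L with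
  | nil => intro _; rfl
  | cons a t ih =>
    intro hp
    have ht := (List.pairwise_cons.mp hp).2
    have ha := (List.pairwise_cons.mp hp).1
    by_cases hal : a < l
    · rw [List.filter_cons_of_pos (by simp [hal]),
        List.filter_cons_of_neg (by simp; omega)]
      simpa using congrArg (a :: ·) (ih ht)
    · rw [List.filter_cons_of_neg (by simp [hal]),
        List.filter_cons_of_pos (by simp; omega)]
      have h1 : t.filter (fun j => decide (j < l)) = [] := by
        apply List.filter_eq_nil_iff.mpr
        intro b hb
        have := ha b hb
        simp; omega
      have h2 : t.filter (fun j => decide (l ≤ j)) = t := by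
        apply List.filter_eq_self.mpr
        intro b hb
        have := ha b hb
        simp; omega
      rw [h1, h2]
      rfl

lemma maxIf (a b : Int) : (if a < b then b else a) = max a b := by
  by_cases h : a < b
  · simp [h, max_eq_right h.le]
  · simp [h, max_eq_left (not_lt.mp h)]

-- the reference shrink loop stops immediately when x's count is within bound
lemma shrinkR_stop {nums : List Int} {k x : Int} {W : List Int} (fuel : Nat)
    (freq : PySem.Dict Int Int) (l : Int)
    (h : Cnt freq W) (hc : (W.count x : Int) ≤ k) :
    shrinkR nums k x (fuel + 1) freq l = (freq, l) := by
  by_cases h0 : W.count x = 0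
  · have hg := cnt_get?_none h h0
    simp only [shrinkR, hg]
  · have hg := cnt_get? h (Nat.pos_of_ne_zero h0)
    have hnot : ¬ k < ((W.count x : Nat) : Int) := by omega
    simp only [shrinkR, hg, if_neg hnot]

-- when the new element's count just exceeded k, the shrink loop ends right past the
-- first occurrence of x in the window, whose count drops back to exactly k
lemma shrinkR_go (nums : List Int) (k x : Int) (i : Nat) (hk : 1 ≤ k) :
    ∀ (fuel l : Nat) (freq : PySem.Dict Int Int),
      ((nums.take i).drop l).length < fuel →
      Cnt freq ((nums.take i).drop l) →
      (((nums.take i).drop l).count x : Int) = k + 1 →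
      ∃ (j : Nat) (freq' : PySem.Dict Int Int),
        l ≤ j ∧ j < i ∧ nums[j]? = some x ∧
        (∀ m, l ≤ m → m < j → ¬ nums[m]? = some x) ∧
        shrinkR nums k x fuel freq (l : Int) = (freq', ((j + 1 : Nat) : Int)) ∧
        Cnt freq' ((nums.take i).drop (j + 1)) ∧
        (((nums.take i).drop (j + 1)).count x : Int) = k := by
  intro fuel
  induction fuel with
  | zero => intro l freq hlen _ _; omega
  | succ fuel ih =>
    intro l freq hlen hcnt hc
    set W := (nums.take i).drop l with hW
    have hx : 0 < W.count x := by omega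
    have hgx := cnt_get? hcnt hx
    have hWne : W ≠ [] := by intro hnil; rw [hnil] at hx; simp at hx
    have hllt : l < (nums.take i).length := by
      by_contra hge
      exact hWne (List.drop_eq_nil_of_le (by omega))
    have hli : l < i := by
      have : (nums.take i).length ≤ i := by simp
      omega
    have hlin : l < nums.length := lt_of_lt_of_le hllt (by simp)
    have hWhead : W = nums[l] :: (nums.take i).drop (l + 1) := by
      rw [hW, List.drop_eq_getElem_cons hllt, List.getElem_take]
    have hpy : PySem.List.pyGet? nums (l : Int) = some nums[l] := by
      rw [PySem.List.pyGet?_natCast]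
      exact List.getElem?_eq_getElem hlin
    have hcy : 0 < W.count nums[l] := by rw [hWhead]; simp
    have hgy := cnt_get? hcnt hcy
    have hcnt' : Cnt (if (W.count nums[l] : Int) - 1 = 0
          then (freq.insert nums[l] ((W.count nums[l] : Int) - 1)).erase nums[l]
          else freq.insert nums[l] ((W.count nums[l] : Int) - 1)) ((nums.take i).drop (l + 1)) :=
      cnt_step (by rw [← hWhead]; exact hcnt) (by rw [hgy])
    have hWlen : W.length = ((nums.take i).drop (l + 1)).length + 1 := by
      rw [hWhead]; simp
    have hcast : ((l : Int) + 1) = ((l + 1 : Nat) : Int) := by push_cast; ring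
    by_cases hyx : nums[l] = x
    · -- passed the first occurrence of x: count is back to k, next check stops
      have hc' : (((nums.take i).drop (l + 1)).count x : Int) = k := by
        have : W.count x = ((nums.take i).drop (l + 1)).count x + 1 := by
          rw [hWhead, hyx, List.count_cons_self]
        omega
      obtain ⟨f, rfl⟩ : ∃ f, fuel = f + 1 := by
        have hlb : (k.toNat : Int) = k := Int.toNat_of_nonneg (by omega)
        have : ((nums.take i).drop (l + 1)).count x ≥ k.toNat := by omega
        have : ((nums.take i).drop (l + 1)).length ≥ k.toNat := by
          calc ((nums.take i).drop (l + 1)).length ≥ ((nums.take i).drop (l + 1)).count x :=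
                List.count_le_length
            _ ≥ k.toNat := this
        have hk1 : 1 ≤ k.toNat := by omega
        cases fuel with
        | zero => omega
        | succ f => exact ⟨f, rfl⟩
      refine ⟨l, (if (W.count nums[l] : Int) - 1 = 0
          then (freq.insert nums[l] ((W.count nums[l] : Int) - 1)).erase nums[l]
          else freq.insert nums[l] ((W.count nums[l] : Int) - 1)),
        le_refl l, hli, by rw [List.getElem?_eq_getElem hlin, hyx], ?_, ?_, hcnt', hc'⟩
      · intro m h1 h2; omega
      · show shrinkR nums k x (f + 1 + 1) freq (l : Int) = _
        simp only [shrinkR, hgx, hpy, hgy]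
        rw [if_pos (by omega), hcast]
        exact shrinkR_stop f _ _ hcnt' (by omega)
    · -- head is not x: count unchanged, recurse
      have hc' : (((nums.take i).drop (l + 1)).count x : Int) = k + 1 := by
        have : W.count x = ((nums.take i).drop (l + 1)).count x := by
          rw [hWhead, List.count_cons_of_ne hyx]
        omega
      obtain ⟨j, freq', hlj, hji, hjx, hmin, hsh, hC, hK⟩ :=
        ih (l + 1) _ (by omega) hcnt' hc'
      refine ⟨j, freq', by omega, hji, hjx, ?_, ?_, hC, hK⟩
      · intro m h1 h2
        by_cases hml : m = l
        · subst hml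
          rw [List.getElem?_eq_getElem hlin]
          intro hcon
          exact hyx (Option.some.inj hcon)
        · exact hmin m (by omega) h2
      · show shrinkR nums k x (fuel + 1) freq (l : Int) = _
        simp only [shrinkR, hgx, hpy, hgy]
        rw [if_pos (by omega), hcast]
        exact hsh

-- the reference fold and B's fold agree (on the left pointer and the best length)
lemma outer2 (nums : List Int) (k : Int) (hk : 1 ≤ k) :
    ∀ (ts : List Int) (i l : Nat) (freq : PySem.Dict Int Int)
      (pos : PySem.Dict Int (List Int)) (ml : Int),
      nums = nums.take i ++ ts →
      l ≤ i →
      Cnt freq ((nums.take i).drop l) →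
      (∀ y : Int, (((nums.take i).drop l).count y : Int) ≤ k) →
      (∀ x : Int, pos.getD x [] = (occ nums x i).map (Nat.cast : Nat → Int)) →
      ((PySem.List.enumerate ts (i : Int)).foldl (stepR nums k) (freq, (l : Int), ml)).2
        = ((PySem.List.enumerate ts (i : Int)).foldl (stepB k) (pos, (l : Int), ml)).2 := by
  intro ts
  induction ts with
  | nil => intro i l freq pos ml _ _ _ _ _; rfl
  | cons t ts' ih =>
    intro i l freq pos ml hsplit hli hcnt hklt hpos
    have hile : i ≤ nums.length := by
      by_contra hgt
      have htake : nums.take i = nums := List.take_of_length_le (by omega)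
      have := congrArg List.length hsplit
      rw [htake] at this; simp at this
    have htl : (nums.take i).length = i := by simp [hile]
    have hilen : i < nums.length := by
      have h2 := congrArg List.length hsplit
      simp only [List.length_append, htl, List.length_cons] at h2
      omega
    have hnum_i : nums[i]? = some t := by
      conv_lhs => rw [hsplit]
      rw [List.getElem?_append_right (by omega)]
      simp [htl]
    have htake1 : nums.take (i + 1) = nums.take i ++ [t] := by
      rw [List.take_add_one, hnum_i]; rfl
    rw [PySem.List.enumerate_cons]
    simp only [List.foldl_cons]
    have hWin : (nums.take (i + 1)).drop l = (nums.take i).drop l ++ [t] := by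
      rw [htake1, List.drop_append_of_le_length (by omega)]
    have hcnt1 : Cnt (freq.insert t (freq.getD t 0 + 1)) ((nums.take (i + 1)).drop l) := by
      rw [hWin]; exact cnt_insert t hcnt
    -- B's occurrence list for t
    set L := occ nums t (i + 1) with hLdef
    have hocc1 : occ nums t (i + 1) = occ nums t i ++ [i] := by
      rw [occ_succ, if_pos hnum_i]
    have hlst : pos.getD t [] ++ [(i : Int)] = L.map (Nat.cast : Nat → Int) := by
      rw [hpos t, hLdef, hocc1, List.map_append]; rfl
    -- window count of t after adding it
    have hcw : (((nums.take (i + 1)).drop l).count t : Int)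
        = ((L.filter (fun j => decide (l ≤ j))).length : Int) := by
      rw [count_window nums t (i + 1) l]
    have hcb : ((nums.take (i + 1)).drop l).count t = ((nums.take i).drop l).count t + 1 := by
      rw [hWin, List.count_append]; simp
    have hck1 : (((nums.take (i + 1)).drop l).count t : Int) ≤ k + 1 := by
      have := hklt t
      push_cast [hcb]
      omega
    -- the split of L at l
    set Lo := L.filter (fun j => decide (j < l)) with hLo
    set F := L.filter (fun j => decide (l ≤ j)) with hF
    have hsplitL : L = Lo ++ F := split_sorted l L (occ_sorted nums t (i + 1))
    have hLlen : L.length = Lo.length + F.length := by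
      conv_lhs => rw [hsplitL]
      exact List.length_append
    have hFc : (F.length : Int) = (((nums.take (i + 1)).drop l).count t : Int) := hcw.symm
    -- the new left pointer produced by both programs
    have hothers1 : ∀ y : Int, y ≠ t → ((((nums.take (i + 1)).drop l).count y : Int)) ≤ k := by
      intro y hy
      rw [hWin]
      have h4 := hklt y
      have h5 : List.count y [t] = 0 := by simp [List.count_eq_zero, hy]
      rw [List.count_append, h5]
      push_cast
      omega
    -- B's new position dict satisfies the invariant at i+1
    have hpos1 : ∀ x : Int, (pos.insert t (pos.getD t [] ++ [(i : Int)])).getD x []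
        = (occ nums x (i + 1)).map (Nat.cast : Nat → Int) := by
      intro x
      rw [PySem.Dict.getD_insert]
      split_ifs with hxt
      · subst hxt; rw [hlst]
      · rw [hpos x, occ_succ]
        have : ¬ nums[i]? = some x := by
          rw [hnum_i]; intro hcon; exact hxt (Option.some.inj hcon).symm
        rw [if_neg this, List.append_nil]
    have hsplit' : nums = nums.take (i + 1) ++ ts' := by
      rw [htake1]
      conv_lhs => rw [hsplit]
      simp
    have hcast : ((i : Int) + 1) = ((i + 1 : Nat) : Int) := by push_cast; ring
    -- case analysis on whether the bound is exceeded
    by_cases hbig : k < (((nums.take (i + 1)).drop l).count t : Int)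
    · -- count is exactly k+1: shrink to just past the first in-window occurrence of t
      have hceq : (((nums.take (i + 1)).drop l).count t : Int) = k + 1 := by omega
      have hlen1 : ((nums.take (i + 1)).drop l).length < nums.length + 1 := by
        have : ((nums.take (i + 1)).drop l).length ≤ (nums.take (i + 1)).length := by
          rw [List.length_drop]; omega
        have h2 : (nums.take (i + 1)).length ≤ nums.length := by simp
        omega
      obtain ⟨j, freq', hlj, hji, hjx, hmin, hsh, hC, hK⟩ :=
        shrinkR_go nums k t (i + 1) hk (nums.length + 1) l
          (freq.insert t (freq.getD t 0 + 1)) hlen1 hcnt1 hceq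
      -- B's index computation gives the same j
      have hFlen : (F.length : Int) = k + 1 := by rw [hFc, hceq]
      have hkl : k < (((pos.getD t [] ++ [(i : Int)]).length : Nat) : Int) := by
        have : (pos.getD t [] ++ [(i : Int)]).length = L.length := by
          rw [hlst, List.length_map]
        rw [this]
        omega
      -- F is nonempty with head j
      have hFne : F ≠ [] := by
        intro hnil
        rw [hnil] at hFlen
        simp at hFlen
        omega
      obtain ⟨a, F', hFcons⟩ := List.exists_cons_of_ne_nil hFne
      have haj : a = j := by
        have haF : a ∈ F := by rw [hFcons]; exact List.mem_cons_self
        have haocc : a ∈ L := by rw [hsplitL]; exact List.mem_append_right _ haF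
        have hamem := mem_occ.mp haocc
        have hal : l ≤ a := by
          have := List.of_mem_filter haF
          simpa using this
        have hjF : j ∈ F := by
          apply List.mem_filter.mpr
          constructor
          · exact mem_occ.mpr ⟨hji, hjx⟩
          · simp [hlj]
        have hjle : a ≤ j := by
          rw [hFcons] at hjF
          rcases List.mem_cons.mp hjF with h | h
          · omega
          · have hpw := (occ_sorted nums t (i + 1)).sublist (hsplitL ▸ List.sublist_append_right Lo F)
            have := (List.pairwise_cons.mp (hFcons ▸ hpw)).1 j h
            omega
        by_contra hne
        have : a < j := by omega
        exact hmin a hal this hamem.2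
      -- B reads L[L.length - (k+1)] = F.head = j
      have hknat : (k.toNat : Int) = k := Int.toNat_of_nonneg (by omega)
      have hidx : -(k + 1) = -(((k.toNat + 1 : Nat)) : Int) := by push_cast; omega
      have hlenL : (pos.getD t [] ++ [(i : Int)]).length = L.length := by
        rw [hlst, List.length_map]
      have hFlenN : F.length = k.toNat + 1 := by omega
      have hpL : L.length - (k.toNat + 1) = Lo.length := by omega
      have hL0 : L[Lo.length]? = some j := by
        rw [hsplitL, hFcons, List.getElem?_append_right (le_refl Lo.length)]
        simp [haj]
      have hget : PySem.List.pyGet? (pos.getD t [] ++ [(i : Int)]) (-(k + 1))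
          = some ((j : Nat) : Int) := by
        rw [hidx, PySem.List.pyGet?_neg_natCast _ _ (by omega) (by rw [hlenL]; omega)]
        rw [hlst, List.length_map, hpL, List.getElem?_map, hL0]
        rfl
      -- both sides' step results
      have hstepR : stepR nums k (freq, (l : Int), ml) ((i : Int), t)
          = (freq', ((j + 1 : Nat) : Int), max ml ((i : Int) - ((j + 1 : Nat) : Int) + 1)) := by
        unfold stepR
        simp only
        rw [hsh]
      have hstart : ((l : Int) < (j : Int) + 1) := by
        have : (l : Int) ≤ (j : Int) := by exact_mod_cast hlj
        omega
      have hstepB : stepB k (pos, (l : Int), ml) ((i : Int), t)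
          = (pos.insert t (pos.getD t [] ++ [(i : Int)]), ((j + 1 : Nat) : Int),
             max ml ((i : Int) - ((j + 1 : Nat) : Int) + 1)) := by
        unfold stepB
        simp only
        rw [if_pos hkl]
        simp only [hget]
        rw [if_pos hstart,
          show ((j : Int) + 1) = ((j + 1 : Nat) : Int) by push_cast; ring, maxIf]
      rw [hstepR, hstepB, hcast]
      -- invariants at i+1 with left pointer j+1
      have hK' : ∀ y : Int, (((nums.take (i + 1)).drop (j + 1)).count y : Int) ≤ k := by
        intro y
        by_cases hyt : y = t
        · subst hyt; omega
        · have hsub : ((nums.take (i + 1)).drop (j + 1)).count y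
              ≤ ((nums.take (i + 1)).drop l).count y := by
            have : (nums.take (i + 1)).drop (j + 1) = ((nums.take (i + 1)).drop l).drop (j + 1 - l) := by
              rw [List.drop_drop]
              congr 1
              omega
            rw [this]
            exact (List.drop_sublist _ _).count_le _
          have := hothers1 y hyt
          have := hsub
          push_cast at *
          omega
      exact ih (i + 1) (j + 1) freq' _ _ hsplit' (by omega) hC hK' hpos1
    · -- count within bound: neither side moves the left pointer
      have hstop : shrinkR nums k t (nums.length + 1) (freq.insert t (freq.getD t 0 + 1)) (l : Int)
          = (freq.insert t (freq.getD t 0 + 1), (l : Int)) :=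
        shrinkR_stop _ _ _ hcnt1 (by omega)
      have hstepR : stepR nums k (freq, (l : Int), ml) ((i : Int), t)
          = (freq.insert t (freq.getD t 0 + 1), (l : Int), max ml ((i : Int) - (l : Int) + 1)) := by
        unfold stepR
        simp only
        rw [hstop]
      have hstepB : stepB k (pos, (l : Int), ml) ((i : Int), t)
          = (pos.insert t (pos.getD t [] ++ [(i : Int)]), (l : Int),
             max ml ((i : Int) - (l : Int) + 1)) := by
        unfold stepB
        simp only
        have hstartB : (if k < (((pos.getD t [] ++ [(i : Int)]).length : Nat) : Int) then
            match PySem.List.pyGet? (pos.getD t [] ++ [(i : Int)]) (-(k + 1)) with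
            | none => (l : Int)
            | some j => if (l : Int) < j + 1 then j + 1 else (l : Int)
          else (l : Int)) = (l : Int) := by
          by_cases hkl : k < (((pos.getD t [] ++ [(i : Int)]).length : Nat) : Int)
          · rw [if_pos hkl]
            -- length of the full occurrence list exceeds k, but in-window count does not:
            -- the read index falls below l
            have hlenL : (pos.getD t [] ++ [(i : Int)]).length = L.length := by
              rw [hlst, List.length_map]
            have hLk : k < (L.length : Int) := by rw [← hlenL]; exact hkl
            have hknat : (k.toNat : Int) = k := Int.toNat_of_nonneg (by omega)
            have hidx : -(k + 1) = -(((k.toNat + 1 : Nat)) : Int) := by push_cast; omega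
            have hFk : (F.length : Int) ≤ k := by rw [hFc]; omega
            set n := L.length - (k.toNat + 1) with hn
            have hp : n < Lo.length := by omega
            obtain ⟨m, hm0, hml⟩ : ∃ m, L[n]? = some m ∧ m < l := by
              rw [hsplitL, List.getElem?_append_left hp]
              refine ⟨_, List.getElem?_eq_getElem hp, ?_⟩
              have hm : Lo[n] ∈ Lo := List.getElem_mem hp
              have := List.of_mem_filter hm
              simpa using this
            have hget : PySem.List.pyGet? (pos.getD t [] ++ [(i : Int)]) (-(k + 1))
                = some ((m : Nat) : Int) := by
              rw [hidx, PySem.List.pyGet?_neg_natCast _ _ (by omega) (by rw [hlenL]; omega)]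
              rw [hlst, List.length_map, ← hn, List.getElem?_map, hm0]
              rfl
            simp only [hget]
            rw [if_neg (by
              have : (m : Int) + 1 ≤ (l : Int) := by exact_mod_cast Nat.succ_le_of_lt hml
              omega)]
          · rw [if_neg hkl]
        rw [hstartB, maxIf]
      rw [hstepR, hstepB, hcast]
      have hK' : ∀ y : Int, (((nums.take (i + 1)).drop l).count y : Int) ≤ k := by
        intro y
        by_cases hyt : y = t
        · subst hyt; omega
        · exact hothers1 y hyt
      exact ih (i + 1) l _ _ _ hsplit' (by omega) hcnt1 hK' hpos1

-- ===== VERDICT (by name: the statement is the Claim_ definition above) =====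
theorem longest_good_subarray_spec : Claim_equal_longest_good_subarray := by
  unfold Claim_equal_longest_good_subarray
  intro nums k _ hpre
  unfold Spec_longest_good_subarray
  rcases hpre with hnil | hk
  · subst hnil; rfl
  · unfold longest_good_subarray longest_good_subarray_alt
    have h0 : ((0 : Nat) : Int) = (0 : Int) := rfl
    have h1 := outer_eq nums k hk nums 0 0 PySem.Dict.empty 0 (by simp) (le_refl 0)
      (by constructor
          · intro y; simp [PySem.Dict.getD_empty]
          · intro p hp; simp [PySem.Dict.empty] at hp)
      (by intro y; simp; omega)
    have h2 := outer2 nums k hk nums 0 0 PySem.Dict.empty PySem.Dict.empty 0 (by simp) (le_refl 0)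
      (by constructor
          · intro y; simp [PySem.Dict.getD_empty]
          · intro p hp; simp [PySem.Dict.empty] at hp)
      (by intro y; simp; omega)
      (by intro x; simp [PySem.Dict.getD_empty, occ])
    rw [h0] at h1 h2
    rw [h1]
    exact congrArg Prod.snd h2
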